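-- pv_equiv track=rewrite | github.com/sollotimer8781/demoWB | product_service.py | sanitize_custom_field_key
-- ===== SOURCE A (Python) =====
-- from typing import Any, Dict, Iterable, List, Mapping, Optional, Sequence, Tuple
--
-- def sanitize_custom_field_key(raw: str) -> Optional[str]:
--     if not raw:
--         return None
--     key = raw.strip().lower()
--     if not key:
--         return None
--     normalized_chars: List[str] = []
--     for char in key:
--         if char.isalnum():
--             normalized_chars.append(char)
--         elif char in {" ", "-", "_"}:
--             normalized_chars.append("_")
--     normalized = "".join(normalized_chars).strip("_")
--     while "__" in normalized:
--         normalized = normalized.replace("__", "_")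
--     return normalized or None
-- ===== SOURCE B (Python) =====
-- from typing import Optional
--
-- def sanitize_custom_field_key(raw: str) -> Optional[str]:
--     if not raw:
--         return None
--     key = raw.strip().lower()
--     if not key:
--         return None
--     out = []
--     for char in key:
--         if char.isalnum():
--             out.append(char)
--         elif char in {" ", "-", "_"}:
--             if out and out[-1] != "_":
--                 out.append("_")
--     if out and out[-1] == "_":
--         out.pop()
--     return "".join(out) or None
-- ===== Notes on version B (the rewrite author's own statement) =====
-- stated objective: simpler
-- what changed: A filters into a list, joins, strips outer underscores, then repeatedly runs whole-string replace passes until no doubled underscore remains; B builds the key in one stateful scan that suppresses leading and duplicate separators as it goes and pops at most one trailing underscore.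
import Mathlib
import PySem

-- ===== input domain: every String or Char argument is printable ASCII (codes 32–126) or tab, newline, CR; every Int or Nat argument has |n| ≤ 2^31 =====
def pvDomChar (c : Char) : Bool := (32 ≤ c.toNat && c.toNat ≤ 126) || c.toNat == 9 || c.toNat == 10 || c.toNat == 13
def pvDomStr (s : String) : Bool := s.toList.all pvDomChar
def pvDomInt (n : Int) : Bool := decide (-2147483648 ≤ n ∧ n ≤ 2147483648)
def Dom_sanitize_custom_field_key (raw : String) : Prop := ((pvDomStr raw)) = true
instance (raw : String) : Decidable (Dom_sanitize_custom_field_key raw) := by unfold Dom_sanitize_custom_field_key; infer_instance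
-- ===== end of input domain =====

-- B replaces A's three-phase pipeline (filter, strip('_'), repeated '__'→'_' replace passes) by a
-- single stateful scan; same return value everywhere (objective: simpler/one pass).

-- ===== PORT A =====
-- per-char body of A's for-loop
def pvAStep (acc : List Char) (c : Char) : List Char :=
  if PySem.Chars.isalnum c then acc ++ [c]
  else if c ∈ [' ', '-', '_'] then acc ++ ['_'] else acc

-- A's `while "__" in normalized: normalized = normalized.replace("__", "_")`.
-- The fuel argument only bounds the iteration count (each replace strictly shortens the
-- string, so `length + 1` iterations always suffice); it is a totality guard, not a change of algorithm.
def pvCollapseLoop : Nat → List Char → List Char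
  | 0, s => s
  | f + 1, s =>
    if PySem.Chars.isIn ['_', '_'] s then pvCollapseLoop f (PySem.Chars.replace s ['_', '_'] ['_'])
    else s

def sanitize_custom_field_key (raw : String) : Option String :=
  if raw.toList.isEmpty then none
  else
    let key := PySem.Chars.lower (PySem.Chars.strip raw.toList)
    if key.isEmpty then none
    else
      let normalized_chars := key.foldl pvAStep []
      let normalized := PySem.Chars.stripChars normalized_chars ['_']
      let final := pvCollapseLoop (normalized.length + 1) normalized
      if final.isEmpty then none else some (String.ofList final)

-- ===== PORT B =====
-- per-char body of B's for-loop: append alnum; for ' ', '-', '_' append '_' only after content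
-- and never twice in a row; skip everything else
def pvBStep (out : List Char) (c : Char) : List Char :=
  if PySem.Chars.isalnum c then out ++ [c]
  else if c ∈ [' ', '-', '_'] then
    if out ≠ [] ∧ out.getLast? ≠ some '_' then out ++ ['_'] else out
  else out

def sanitize_custom_field_key_alt (raw : String) : Option String :=
  if raw.toList.isEmpty then none
  else
    let key := PySem.Chars.lower (PySem.Chars.strip raw.toList)
    if key.isEmpty then none
    else
      let out := key.foldl pvBStep []
      let out := if out ≠ [] ∧ out.getLast? = some '_' then out.dropLast else out
      if out.isEmpty then none else some (String.ofList out)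

-- ===== PRECONDITION & SPEC =====
def Spec_sanitize_custom_field_key (raw : String) (out : Option String) : Prop := out = sanitize_custom_field_key_alt raw
instance (raw : String) (out : Option String) : Decidable (Spec_sanitize_custom_field_key raw out) := by unfold Spec_sanitize_custom_field_key; infer_instance

-- ===== CLAIM (what is proved, stated in full; the proofs are below) =====
def Claim_equal_sanitize_custom_field_key : Prop := ∀ (raw : String), Dom_sanitize_custom_field_key raw → Spec_sanitize_custom_field_key raw (sanitize_custom_field_key raw)

-- ===== LEMMAS AND PROOFS =====
def pvRep2 : List Char → List Char
  | [] => []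
  | [c] => [c]
  | a :: b :: t => if a = '_' ∧ b = '_' then '_' :: pvRep2 t else a :: pvRep2 (b :: t)
def pvStep2 (out : List Char) (c : Char) : List Char :=
  if c = '_' then (if out ≠ [] ∧ out.getLast? ≠ some '_' then out ++ ['_'] else out)
  else out ++ [c]
def pvPop (l : List Char) : List Char :=
  if l ≠ [] ∧ l.getLast? = some '_' then l.dropLast else l
def pvNoDD : List Char → Bool
  | [] => true
  | [_] => true
  | a :: b :: t => !(a == '_' && b == '_') && pvNoDD (b :: t)

lemma pvReplace_go_eq (fuel : Nat) (l acc : List Char) (h : l.length ≤ fuel) :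
    PySem.Chars.replace.go ['_', '_'] ['_'] fuel l acc = acc.reverse ++ pvRep2 l := by
  induction fuel generalizing l acc with
  | zero =>
    have : l = [] := by cases l <;> simp_all
    subst this
    simp [PySem.Chars.replace.go, pvRep2]
  | succ f ih =>
    cases l with
    | nil => simp [PySem.Chars.replace.go, pvRep2]
    | cons c t =>
      rw [PySem.Chars.replace.go]
      by_cases hp : List.isPrefixOf ['_', '_'] (c :: t) = true
      · rw [if_pos hp]
        rw [List.isPrefixOf_iff_prefix] at hp
        obtain ⟨rfl, t', rfl⟩ : c = '_' ∧ ∃ t', t = '_' :: t' := by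
          cases t with
          | nil => simp [List.prefix_cons_iff] at hp
          | cons b t' =>
            obtain ⟨u, hu⟩ := hp
            simp at hu
            exact ⟨hu.1.symm, t', by rw [hu.2.1]⟩
        rw [ih _ _ (by simp at h ⊢; omega)]
        simp [pvRep2]
      · rw [if_neg hp]
        rw [ih t (c :: acc) (by simpa using Nat.le_of_succ_le_succ h)]
        have he : pvRep2 (c :: t) = c :: pvRep2 t := by
          cases t with
          | nil => simp [pvRep2]
          | cons b t' =>
            rw [pvRep2, if_neg]
            rintro ⟨rfl, rfl⟩
            exact hp (by simp [List.isPrefixOf])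
        simp [he]

lemma pvReplace_eq_rep2 (s : List Char) :
    PySem.Chars.replace s ['_', '_'] ['_'] = pvRep2 s := by
  rw [PySem.Chars.replace]
  rw [if_neg (by simp)]
  exact pvReplace_go_eq s.length s [] (le_refl _)

lemma pvRep2_length_le (s : List Char) : (pvRep2 s).length ≤ s.length := by
  induction s using pvRep2.induct with
  | case1 => simp [pvRep2]
  | case2 c => simp [pvRep2]
  | case3 a b t h ih => simp only [pvRep2, if_pos h]; simp; omega
  | case4 a b t h ih => simp only [pvRep2, if_neg h]; simpa using ih

lemma pvRep2_nil_iff (s : List Char) : pvRep2 s = [] ↔ s = [] := by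
  induction s using pvRep2.induct with
  | case1 => simp [pvRep2]
  | case2 c => simp [pvRep2]
  | case3 a b t h ih => simp [pvRep2, if_pos h]
  | case4 a b t h ih => simp [pvRep2, if_neg h]

lemma pvRep2_length_lt (s : List Char) (h : ['_', '_'] <:+: s) :
    (pvRep2 s).length < s.length := by
  induction s using pvRep2.induct with
  | case1 => simp at h
  | case2 c => have := h.length_le; simp at this
  | case3 a b t hg ih =>
    have := pvRep2_length_le t
    simp only [pvRep2, if_pos hg]; simp; omega
  | case4 a b t hg ih =>
    rw [List.infix_cons_iff] at h
    rcases h with h | h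
    · rcases h with ⟨u, hu⟩
      simp at hu
      exact absurd ⟨hu.1.symm, hu.2.1.symm⟩ hg
    · simp only [pvRep2, if_neg hg]
      have := ih h
      simp at this ⊢; omega

lemma pvGetLast?_cons_ne (c : Char) (l : List Char) (h : l ≠ []) :
    (c :: l).getLast? = l.getLast? := by
  cases l with
  | nil => exact absurd rfl h
  | cons b t => exact List.getLast?_cons_cons

lemma pvRep2_head (s : List Char) (h : s.head? ≠ some '_') :
    (pvRep2 s).head? ≠ some '_' := by
  induction s using pvRep2.induct with
  | case1 => simp [pvRep2]
  | case2 c => simpa [pvRep2] using h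
  | case3 a b t hg ih => exact absurd (by simp [hg.1]) h
  | case4 a b t hg ih => simp only [pvRep2, if_neg hg]; simpa using h

lemma pvRep2_last (s : List Char) (h : s.getLast? ≠ some '_') :
    (pvRep2 s).getLast? ≠ some '_' := by
  induction s using pvRep2.induct with
  | case1 => simp [pvRep2]
  | case2 c => simpa [pvRep2] using h
  | case3 a b t hg ih =>
    rcases List.eq_nil_or_concat t with rfl | ⟨t', x, rfl⟩
    · exact absurd (by simp [hg.2]) h
    · simp only [List.concat_eq_append] at *
      have hx : x ≠ '_' := by
        intro hx
        exact h (by rw [show a :: b :: (t' ++ [x]) = (a :: b :: t') ++ [x] by simp,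
          List.getLast?_concat, hx])
      have ih' := ih (by simp [hx])
      have hne : pvRep2 (t' ++ [x]) ≠ [] := by simp [pvRep2_nil_iff]
      simp only [pvRep2, if_pos hg]
      rw [pvGetLast?_cons_ne _ _ hne]
      exact ih'
  | case4 a b t hg ih =>
    have hne : pvRep2 (b :: t) ≠ [] := by simp [pvRep2_nil_iff]
    simp only [pvRep2, if_neg hg]
    rw [pvGetLast?_cons_ne _ _ hne]
    exact ih (by rw [← List.getLast?_cons_cons (a := a)]; exact h)

lemma pvStep2_dd (a : List Char) : pvStep2 (pvStep2 a '_') '_' = pvStep2 a '_' := by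
  simp only [pvStep2]
  split_ifs with h1 h2 <;> simp_all

lemma pvFoldl_step2_rep2 (s : List Char) (a : List Char) :
    (pvRep2 s).foldl pvStep2 a = s.foldl pvStep2 a := by
  induction s using pvRep2.induct generalizing a with
  | case1 => rfl
  | case2 c => rfl
  | case3 a b t hg ih =>
    obtain ⟨rfl, rfl⟩ := hg
    simp only [pvRep2, and_self, if_true, List.foldl_cons]
    rw [ih, pvStep2_dd]
  | case4 x y t hg ih =>
    simp only [pvRep2, if_neg hg, List.foldl_cons]
    exact ih _

lemma pvNoDD_tail (c : Char) (t : List Char) (h : pvNoDD (c :: t) = true) : pvNoDD t = true := by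
  cases t with
  | nil => rfl
  | cons b t' => simp only [pvNoDD, Bool.and_eq_true] at h; exact h.2

lemma pvNoDD_of_not_infix (s : List Char) (h : ¬ ['_', '_'] <:+: s) : pvNoDD s = true := by
  induction s with
  | nil => rfl
  | cons c t ih =>
    cases t with
    | nil => rfl
    | cons b t' =>
      rw [List.infix_cons_iff, not_or] at h
      simp only [pvNoDD, Bool.and_eq_true]
      constructor
      · by_cases hc : c = '_' <;> by_cases hb : b = '_' <;> simp [hc, hb]
        exact absurd ⟨t', by rw [hc, hb]; simp⟩ h.1
      · exact ih h.2

lemma pvFoldl_step2_noDD (s : List Char) (a : List Char) (ha : a ≠ [])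
    (hdd : pvNoDD s = true) (hh : s.head? = some '_' → a.getLast? ≠ some '_') :
    s.foldl pvStep2 a = a ++ s := by
  induction s generalizing a with
  | nil => simp
  | cons c t ih =>
    by_cases hc : c = '_'
    · subst hc
      have hl := hh rfl
      have hs : pvStep2 a '_' = a ++ ['_'] := by simp [pvStep2, ha, hl]
      have hht : t.head? ≠ some '_' := by
        cases t with
        | nil => simp
        | cons b t' =>
          simp only [pvNoDD, Bool.and_eq_true] at hdd
          simp only [List.head?_cons, ne_eq, Option.some.injEq]
          intro hb
          simp [hb] at hdd
      rw [List.foldl_cons, hs, ih (a ++ ['_']) (by simp) (pvNoDD_tail _ _ hdd) (fun h => absurd h hht)]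
      simp
    · have hs : pvStep2 a c = a ++ [c] := by simp [pvStep2, hc]
      rw [List.foldl_cons, hs, ih (a ++ [c]) (by simp) (pvNoDD_tail _ _ hdd) (by simp [hc])]
      simp

lemma pvLoop_props (f : Nat) (s : List Char) (h : s.length < f) :
    (∀ a, (pvCollapseLoop f s).foldl pvStep2 a = s.foldl pvStep2 a) ∧
      PySem.Chars.isIn ['_', '_'] (pvCollapseLoop f s) = false ∧
      (s.head? ≠ some '_' → (pvCollapseLoop f s).head? ≠ some '_') ∧
      (s.getLast? ≠ some '_' → (pvCollapseLoop f s).getLast? ≠ some '_') := by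
  induction f generalizing s with
  | zero => omega
  | succ f ih =>
    by_cases hin : PySem.Chars.isIn ['_', '_'] s = true
    · have hinf : ['_', '_'] <:+: s := (PySem.Chars.isIn_iff_infix _ _).mp hin
      have hrep := pvReplace_eq_rep2 s
      have hlt : (PySem.Chars.replace s ['_', '_'] ['_']).length < f := by
        rw [hrep]; have := pvRep2_length_lt s hinf; omega
      obtain ⟨ih1, ih2, ih3, ih4⟩ := ih _ hlt
      have hl : pvCollapseLoop (f + 1) s
          = pvCollapseLoop f (PySem.Chars.replace s ['_', '_'] ['_']) := by
        simp [pvCollapseLoop, hin]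
      refine ⟨?_, ?_, ?_, ?_⟩
      · intro a; rw [hl, ih1 a, hrep, pvFoldl_step2_rep2]
      · rw [hl]; exact ih2
      · intro hh; rw [hl]; exact ih3 (by rw [hrep]; exact pvRep2_head s hh)
      · intro hh; rw [hl]; exact ih4 (by rw [hrep]; exact pvRep2_last s hh)
    · have hl : pvCollapseLoop (f + 1) s = s := by
        simp [pvCollapseLoop, hin]
      rw [hl]
      exact ⟨fun a => rfl, by simpa using hin, id, id⟩

def pvQ (c : Char) : Bool := c == '_'

lemma pvHead?_dropWhile (p : Char → Bool) (l : List Char) (a : Char)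
    (h : (l.dropWhile p).head? = some a) : p a = false := by
  induction l with
  | nil => simp at h
  | cons c t ih =>
    rw [List.dropWhile_cons] at h
    split at h
    · exact ih h
    · simp at h; subst h; simp_all

lemma pvLead_drop (m : List Char) :
    List.foldl pvStep2 [] m = List.foldl pvStep2 [] (m.dropWhile pvQ) := by
  induction m with
  | nil => rfl
  | cons c t ih =>
    rw [List.dropWhile_cons]
    by_cases hc : pvQ c = true
    · have hc' : c = '_' := by simpa [pvQ] using hc
      rw [if_pos hc, List.foldl_cons, show pvStep2 [] c = [] by simp [pvStep2, hc']]
      exact ih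
    · rw [if_neg hc]

lemma pvTailus (us : List Char) (a : List Char) (h : ∀ c ∈ us, c = '_') :
    pvPop (List.foldl pvStep2 a us) = pvPop a := by
  induction us generalizing a with
  | nil => rfl
  | cons c t ih =>
    have hc : c = '_' := h c (by simp)
    subst hc
    rw [List.foldl_cons]
    have ht : ∀ c ∈ t, c = '_' := fun c hm => h c (by simp [hm])
    by_cases hg : a ≠ [] ∧ a.getLast? ≠ some '_'
    · rw [show pvStep2 a '_' = a ++ ['_'] by simp [pvStep2, hg.1, hg.2]]
      rw [ih _ ht]
      have h1 : pvPop (a ++ ['_']) = a := by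
        simp [pvPop]
      have h2 : pvPop a = a := by
        simp only [pvPop]; rw [if_neg (by tauto)]
      rw [h1, h2]
    · rw [show pvStep2 a '_' = a by simp [pvStep2, hg]]
      exact ih _ ht

def pvF (c : Char) : Option Char :=
  if PySem.Chars.isalnum c then some c
  else if c ∈ [' ', '-', '_'] then some '_' else none

lemma pvAlnum_ne_underscore {c : Char} (h : PySem.Chars.isalnum c = true) : c ≠ '_' := by
  intro hc; subst hc; exact absurd h (by decide)

lemma pvFoldl_pvAStep (l : List Char) (a : List Char) :
    l.foldl pvAStep a = a ++ l.filterMap pvF := by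
  induction l generalizing a with
  | nil => simp
  | cons c t ih =>
    rw [List.foldl_cons, List.filterMap_cons]
    have hb : pvAStep a c = a ++ (pvF c).toList := by
      simp only [pvAStep, pvF]; split_ifs <;> simp
    cases hf : pvF c <;> rw [hf] at hb <;> simp [hb, ih]

lemma pvFoldl_pvBStep (l : List Char) (a : List Char) :
    l.foldl pvBStep a = (l.filterMap pvF).foldl pvStep2 a := by
  induction l generalizing a with
  | nil => simp
  | cons c t ih =>
    rw [List.foldl_cons, List.filterMap_cons]
    have hb : pvBStep a c = (pvF c).elim a (pvStep2 a) := by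
      simp only [pvBStep, pvF]
      split_ifs with h1 h2 h3
      · simp [pvStep2, pvAlnum_ne_underscore h1]
      · simp [pvStep2, h3]
      · simp [pvStep2, h3]
      · simp
    cases hf : pvF c <;> rw [hf] at hb <;> simp [hb, ih]

lemma pvMain (key : List Char) :
    pvCollapseLoop ((PySem.Chars.stripChars (key.foldl pvAStep []) ['_']).length + 1)
        (PySem.Chars.stripChars (key.foldl pvAStep []) ['_'])
      = pvPop (key.foldl pvBStep []) := by
  have hq : (fun c => List.contains ['_'] c) = pvQ := by
    funext c
    simp only [List.contains_cons, List.contains_nil, Bool.or_false]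
    rfl
  have hA : key.foldl pvAStep [] = key.filterMap pvF := by simpa using pvFoldl_pvAStep key []
  have hB : key.foldl pvBStep [] = (key.filterMap pvF).foldl pvStep2 [] := pvFoldl_pvBStep key []
  set fm := key.filterMap pvF with hfm
  set u := fm.dropWhile pvQ with hu
  set core := (u.reverse.dropWhile pvQ).reverse with hcore
  have hstrip : PySem.Chars.stripChars fm ['_'] = core := by
    simp only [PySem.Chars.stripChars, hq]
    rfl
  -- u = core ++ us with us all underscores
  set us := (u.reverse.takeWhile pvQ).reverse with hus
  have hdecomp : u = core ++ us := by
    conv_lhs => rw [← List.reverse_reverse u, ← List.takeWhile_append_dropWhile (p := pvQ) (l := u.reverse)]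
    rw [List.reverse_append]
  have hus_mem : ∀ c ∈ us, c = '_' := by
    intro c hc
    rw [hus, List.mem_reverse] at hc
    have := List.mem_takeWhile_imp hc
    simpa [pvQ] using this
  -- boundary properties of core
  have hcore_head : core.head? ≠ some '_' := by
    intro hh
    cases hc : core with
    | nil => rw [hc] at hh; simp at hh
    | cons c0 t0 =>
      rw [hc] at hh; simp at hh; subst hh
      have h0 : core.reverse <:+ u.reverse := by
        rw [hcore, List.reverse_reverse]
        exact List.dropWhile_suffix pvQ
      have hpre : core <+: u := (List.reverse_suffix).mp h0
      obtain ⟨w, hw⟩ := hpre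
      have : u.head? = some '_' := by rw [← hw, hc]; rfl
      have : pvQ '_' = false := by
        apply pvHead?_dropWhile pvQ fm; rw [← hu]; exact this
      simp [pvQ] at this
  have hcore_last : core.getLast? ≠ some '_' := by
    intro hh
    rw [hcore, List.getLast?_reverse] at hh
    have : pvQ '_' = false := pvHead?_dropWhile pvQ u.reverse _ hh
    simp [pvQ] at this
  -- run the collapse loop
  obtain ⟨hp1, hp2, hp3, hp4⟩ := pvLoop_props (core.length + 1) core (by omega)
  set r := pvCollapseLoop (core.length + 1) core with hr
  have hrnoDD : pvNoDD r = true :=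
    pvNoDD_of_not_infix r ((PySem.Chars.isIn_eq_false_iff _ _).mp hp2)
  have hrhead := hp3 hcore_head
  have hrlast := hp4 hcore_last
  have hr_fix : r = pvPop (List.foldl pvStep2 [] r) := by
    cases hrc : r with
    | nil => simp [pvPop]
    | cons c t =>
      have hcne : c ≠ '_' := by
        rw [hrc] at hrhead; simpa using hrhead
      have h1 : pvStep2 [] c = [c] := by simp [pvStep2, hcne]
      have h2 : List.foldl pvStep2 [c] t = [c] ++ t :=
        pvFoldl_step2_noDD t [c] (by simp) (by rw [hrc] at hrnoDD; exact pvNoDD_tail _ _ hrnoDD)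
          (fun _ => by simp [hcne])
      rw [List.foldl_cons, h1, h2]
      have : (c :: t).getLast? ≠ some '_' := by rw [← hrc]; exact hrlast
      simp only [pvPop]
      rw [if_neg (by tauto)]
      simp
  calc pvCollapseLoop ((PySem.Chars.stripChars (key.foldl pvAStep []) ['_']).length + 1)
        (PySem.Chars.stripChars (key.foldl pvAStep []) ['_'])
      = r := by rw [hA, hstrip, ← hr]
    _ = pvPop (List.foldl pvStep2 [] r) := hr_fix
    _ = pvPop (List.foldl pvStep2 [] core) := by rw [hp1]
    _ = pvPop (List.foldl pvStep2 [] u) := by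
        rw [hdecomp, List.foldl_append, pvTailus us _ hus_mem]
    _ = pvPop (List.foldl pvStep2 [] fm) := by rw [hu, ← pvLead_drop]
    _ = pvPop (key.foldl pvBStep []) := by rw [hB]

-- ===== VERDICT (by name: the statement is the Claim_ definition above) =====
theorem sanitize_custom_field_key_spec : Claim_equal_sanitize_custom_field_key := by
  intro raw _
  unfold Spec_sanitize_custom_field_key
  show sanitize_custom_field_key raw = sanitize_custom_field_key_alt raw
  unfold sanitize_custom_field_key sanitize_custom_field_key_alt
  cases he : raw.toList.isEmpty with
  | true => rw [if_pos rfl, if_pos rfl]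
  | false =>
    cases hk : (PySem.Chars.lower (PySem.Chars.strip raw.toList)).isEmpty with
    | true => simp only [hk, Bool.false_eq_true, if_false, if_true]
    | false =>
      simp only [hk, Bool.false_eq_true, if_false]
      have hm := pvMain (PySem.Chars.lower (PySem.Chars.strip raw.toList))
      simp only [pvPop] at hm
      rw [hm]
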